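-- pv_equiv track=rewrite | github.com/ducanhdt/SpeechBiasingAsr | address_database.py | get_address_fragments
-- ===== SOURCE A (Python) =====
-- def get_address_fragments(token_logit):
--     fragments = []
--     current_start = None
--     # longest_end = None
--     longest_length = 0
--
--     for i, val in enumerate(token_logit):
--         if val == 2:
--             if current_start is not None:
--                 fragments.append((current_start, longest_length))
--             current_start = i
--             longest_length = 1
--
--         elif val == 1 and current_start is not None:
--             # if longest_end is None or i > longest_end:
--             # longest_end = i
--             longest_length += 1
--         else:
--             if current_start is not None:
--                 fragments.append((current_start, longest_length))
--                 current_start = None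
--                 # longest_end = None
--                 longest_length = 0
--
--     # Check if there's a fragment ending at the last position
--     if current_start is not None:
--         fragments.append((current_start, longest_length))
--     return fragments
-- ===== SOURCE B (Python) =====
-- def get_address_fragments(token_logit):
--     tokens = list(token_logit)
--     n = len(tokens)
--     fragments = []
--     i = 0
--     while i < n:
--         if tokens[i] == 2:
--             start = i
--             length = 1
--             i += 1
--             while i < n and tokens[i] == 1:
--                 length += 1
--                 i += 1
--             fragments.append((start, length))
--         else:
--             i += 1
--     return fragments
-- ===== Notes on version B (the rewrite author's own statement) =====
-- stated objective: simpler
-- what changed: Replaces the flat state-threading loop (current_start/longest_length carried across iterations plus a post-loop flush) with an anchor-and-inner-scan: an outer index loop finds each 2 and a nested while consumes its run of 1s, appending the fragment immediately, so no carried state or final flush is needed.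
import Mathlib
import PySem

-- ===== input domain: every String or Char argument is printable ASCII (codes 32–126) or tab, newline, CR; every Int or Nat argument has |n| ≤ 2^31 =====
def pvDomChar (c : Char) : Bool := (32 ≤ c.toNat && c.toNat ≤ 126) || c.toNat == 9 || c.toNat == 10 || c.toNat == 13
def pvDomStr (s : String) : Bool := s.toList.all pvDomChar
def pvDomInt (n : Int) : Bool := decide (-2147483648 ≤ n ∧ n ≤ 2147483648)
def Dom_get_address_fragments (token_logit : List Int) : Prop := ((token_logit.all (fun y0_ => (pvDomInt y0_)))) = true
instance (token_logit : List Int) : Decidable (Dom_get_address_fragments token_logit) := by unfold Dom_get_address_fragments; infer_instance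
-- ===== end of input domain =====

-- B replaces A's flat state-threading loop with an anchor-and-inner-scan decomposition (simpler; same cost).

-- ===== PORT A =====
-- A's for-loop over enumerate(token_logit), threading (fragments, current_start, longest_length).
def pvALoop : List Int → Nat → List (Int × Int) → Option Nat → Int → (List (Int × Int) × Option Nat × Int)
  | [], _, frags, cs, ll => (frags, cs, ll)
  | v :: rest, i, frags, cs, ll =>
    if v = 2 then
      pvALoop rest (i + 1) (match cs with | some s => frags ++ [((s : Int), ll)] | none => frags) (some i) 1
    else if v = 1 ∧ cs ≠ none then
      pvALoop rest (i + 1) frags cs (ll + 1)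
    else
      match cs with
      | some s => pvALoop rest (i + 1) (frags ++ [((s : Int), ll)]) none 0
      | none => pvALoop rest (i + 1) frags none ll

def get_address_fragments (token_logit : List Int) : List (Int × Int) :=
  match pvALoop token_logit 0 [] none 0 with
  | (frags, some s, ll) => frags ++ [((s : Int), ll)]
  | (frags, none, _) => frags

-- ===== PORT B =====
-- inner 'while i < n and tokens[i] == 1' : number of consecutive 1s starting at index i
def pvRun1 (tokens : List Int) (i : Nat) : Nat :=
  if h : i < tokens.length then
    if tokens[i] = 1 then pvRun1 tokens (i + 1) + 1 else 0
  else 0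
termination_by tokens.length - i

-- outer 'while i < n' loop
def pvBOuter (tokens : List Int) (i : Nat) : List (Int × Int) :=
  if h : i < tokens.length then
    if tokens[i] = 2 then
      let len := pvRun1 tokens (i + 1) + 1
      ((i : Int), (len : Int)) :: pvBOuter tokens (i + len)
    else
      pvBOuter tokens (i + 1)
  else []
termination_by tokens.length - i

def get_address_fragments_alt (token_logit : List Int) : List (Int × Int) :=
  pvBOuter token_logit 0

-- ===== PRECONDITION & SPEC =====
def Spec_get_address_fragments (token_logit : List Int) (out : List (Int × Int)) : Prop := out = get_address_fragments_alt token_logit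
instance (token_logit : List Int) (out : List (Int × Int)) : Decidable (Spec_get_address_fragments token_logit out) := by unfold Spec_get_address_fragments; infer_instance

-- ===== CLAIM (what is proved, stated in full; the proofs are below) =====
def Claim_equal_get_address_fragments : Prop := ∀ (token_logit : List Int), Dom_get_address_fragments token_logit → Spec_get_address_fragments token_logit (get_address_fragments token_logit)

-- ===== LEMMAS AND PROOFS =====

-- list-level version of B's outer loop, for the induction
def pvCount1 : List Int → Nat
  | [] => 0
  | x :: xs => if x = 1 then pvCount1 xs + 1 else 0

def pvGoB : List Int → Nat → List (Int × Int)
  | [], _ => []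
  | v :: rest, i =>
    if v = 2 then
      ((i : Int), ((pvCount1 rest + 1 : Nat) : Int)) :: pvGoB (rest.drop (pvCount1 rest)) (i + 1 + pvCount1 rest)
    else pvGoB rest (i + 1)
termination_by l _ => l.length
decreasing_by
  · simpa using Nat.lt_succ_of_le (List.length_drop_le _ _)
  · simp

def pvFlush : (List (Int × Int) × Option Nat × Int) → List (Int × Int)
  | (frags, some s, ll) => frags ++ [((s : Int), ll)]
  | (frags, none, _) => frags

theorem pvRun1_eq (tokens : List Int) (i : Nat) : pvRun1 tokens i = pvCount1 (tokens.drop i) := by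
  rw [pvRun1]
  split
  · next h =>
    have hd : tokens.drop i = tokens[i] :: tokens.drop (i + 1) := List.drop_eq_getElem_cons h
    rw [hd, pvCount1]
    split
    · next h1 => rw [pvRun1_eq tokens (i + 1)]
    · next h1 => simp
  · next h => rw [List.drop_eq_nil_of_le (by omega), pvCount1]
termination_by tokens.length - i

theorem pvBOuter_eq (tokens : List Int) (i : Nat) : pvBOuter tokens i = pvGoB (tokens.drop i) i := by
  rw [pvBOuter]
  split
  · next h =>
    have hd : tokens.drop i = tokens[i] :: tokens.drop (i + 1) := List.drop_eq_getElem_cons h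
    rw [hd, pvGoB]
    split
    · next h2 =>
      rw [pvRun1_eq]
      have := pvBOuter_eq tokens (i + (pvCount1 (tokens.drop (i + 1)) + 1))
      simp only [List.drop_drop] at this ⊢
      rw [this]
      have harith : i + 1 + pvCount1 (tokens.drop (i + 1)) = i + (pvCount1 (tokens.drop (i + 1)) + 1) := by omega
      have harith2 : pvCount1 (tokens.drop (i + 1)) + (i + 1) = i + (pvCount1 (tokens.drop (i + 1)) + 1) := by omega
      simp [harith]
    · next h2 => rw [pvBOuter_eq tokens (i + 1)]
  · next h => rw [List.drop_eq_nil_of_le (by omega), pvGoB]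
termination_by tokens.length - i
decreasing_by all_goals omega

-- mutual invariant for A's loop: outer state (cs = none) and inner state (cs = some s)
theorem pvALoop_main (n : Nat) : ∀ l : List Int, l.length ≤ n →
    (∀ (i : Nat) (frags : List (Int × Int)),
      pvFlush (pvALoop l i frags none 0) = frags ++ pvGoB l i) ∧
    (∀ (i s : Nat) (ll : Int) (frags : List (Int × Int)),
      pvFlush (pvALoop l i frags (some s) ll) =
        frags ++ ((s : Int), ll + (pvCount1 l : Int)) :: pvGoB (l.drop (pvCount1 l)) (i + pvCount1 l)) := by
  induction n with
  | zero =>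
    intro l hl
    have : l = [] := List.eq_nil_of_length_eq_zero (by omega)
    subst this
    constructor
    · intro i frags; simp [pvALoop, pvFlush, pvGoB]
    · intro i s ll frags; simp [pvALoop, pvFlush, pvCount1, pvGoB]
  | succ n ih =>
    intro l hl
    match l with
    | [] =>
      constructor
      · intro i frags; simp [pvALoop, pvFlush, pvGoB]
      · intro i s ll frags; simp [pvALoop, pvFlush, pvCount1, pvGoB]
    | v :: rest =>
      have hr : rest.length ≤ n := by simpa using Nat.lt_succ_iff.mp (by simpa using hl)
      obtain ⟨ihO, ihI⟩ := ih rest hr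
      constructor
      · intro i frags
        by_cases h2 : v = 2
        · subst h2
          rw [pvALoop]
          rw [if_pos rfl]
          rw [ihI (i + 1) i 1 frags]
          rw [pvGoB]
          rw [if_pos rfl]
          have : (1 : Int) + (pvCount1 rest : Int) = ((pvCount1 rest + 1 : Nat) : Int) := by push_cast; ring
          rw [this]
        · rw [pvALoop]
          rw [if_neg h2]
          have hno : ¬ (v = 1 ∧ (none : Option Nat) ≠ none) := by simp
          rw [if_neg hno]
          rw [ihO (i + 1) frags]
          rw [pvGoB, if_neg h2]
      · intro i s ll frags
        by_cases h2 : v = 2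
        · subst h2
          rw [pvALoop]
          rw [if_pos rfl]
          rw [ihI (i + 1) i 1 (frags ++ [((s : Int), ll)])]
          rw [pvCount1]
          rw [if_neg (show ¬ (2 : Int) = 1 by decide)]
          simp only [List.drop_zero]
          rw [pvGoB]
          rw [if_pos rfl]
          have hc : ((s : Int), ll + ((0 : Nat) : Int)) = ((s : Int), ll) := by simp
          have : (1 : Int) + (pvCount1 rest : Int) = ((pvCount1 rest + 1 : Nat) : Int) := by push_cast; ring
          simp [this, Nat.add_comm]
        · by_cases h1 : v = 1
          · subst h1
            rw [pvALoop]
            rw [if_neg h2]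
            have hyes : ((1 : Int) = 1 ∧ (some s : Option Nat) ≠ none) := by simp
            rw [if_pos hyes]
            rw [ihI (i + 1) s (ll + 1) frags]
            rw [pvCount1]
            rw [if_pos rfl]
            have hd : (((1 : Int)) :: rest).drop (pvCount1 rest + 1) = rest.drop (pvCount1 rest) := by simp
            have hcast : ll + 1 + (pvCount1 rest : Int) = ll + ((pvCount1 rest + 1 : Nat) : Int) := by push_cast; ring
            rw [hd, hcast]
            have : i + 1 + pvCount1 rest = i + (pvCount1 rest + 1) := by omega
            rw [this]
          · rw [pvALoop]
            rw [if_neg h2]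
            have hno : ¬ (v = 1 ∧ (some s : Option Nat) ≠ none) := by simp [h1]
            rw [if_neg hno]
            rw [ihO (i + 1) (frags ++ [((s : Int), ll)])]
            rw [pvCount1, if_neg h1]
            simp only [List.drop_zero, Nat.add_zero]
            rw [pvGoB, if_neg h2]
            simp

-- ===== VERDICT (by name: the statement is the Claim_ definition above) =====
theorem get_address_fragments_spec : Claim_equal_get_address_fragments := by
  intro tl _
  unfold Spec_get_address_fragments get_address_fragments get_address_fragments_alt
  rw [pvBOuter_eq]
  have h := (pvALoop_main tl.length tl le_rfl).1 0 []
  simp only [pvFlush] at h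
  simp only [List.drop_zero] at *
  rcases hst : pvALoop tl 0 [] none 0 with ⟨frags, cs, ll⟩
  rw [hst] at h
  cases cs <;> simpa [pvFlush] using h
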